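-- pv_equiv track=rewrite | github.com/Ananta-dot/wagner_implementations | task2_longest-increasing-and-decreasing-subsequence/LIDS.py | find_max_lis_during_sorting
-- ===== SOURCE A (Python) =====
-- def get_batcher_oe_comparators(n):
--     comparators = []
--     p = 1
--     while p < n:
--         k = p
--         while k >= 1:
--             j_start = k % p
--             j_end = n - 1 - k
--             step_j = 2 * k
--             j = j_start
--             while j <= j_end:
--                 i_max = min(k - 1, n - j - k - 1)
--                 for i in range(i_max + 1):
--                     left = (i + j) // (2 * p)
--                     right = (i + j + k) // (2 * p)
--                     if left == right:
--                         comparators.append((i + j, i + j + k))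
--                 j += step_j
--             k //= 2
--         p *= 2
--     return comparators
--
-- def lengthOfLIS(nums):
--     if not nums:
--         return 0
--     n = len(nums)
--     dp = [1] * n
--     for i in range(n):
--         for j in range(i):
--             if nums[i] > nums[j] and dp[i] < dp[j] + 1:
--                 dp[i] = dp[j] + 1
--     return max(dp)
--
-- def find_max_lis_during_sorting(n):
--     comparators = get_batcher_oe_comparators(n)
--     arr = list(range(n, 0, -1))  # Reversed array [n, n-1, ..., 1]
--     max_lis = lengthOfLIS(arr)
--
--     for pair in comparators:
--         i, j = pair
--         if i < len(arr) and j < len(arr):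
--             if arr[i] > arr[j]:
--                 arr[i], arr[j] = arr[j], arr[i]
--                 current_lis = lengthOfLIS(arr)
--                 if current_lis > max_lis:
--                     max_lis = current_lis
--     return max_lis
-- ===== SOURCE B (Python) =====
-- # B: same Batcher odd-even comparator network, but every LIS recomputation uses
-- # patience sorting with a hand-written bisect_left (binary search) instead of the
-- # quadratic DP.
--
-- def get_batcher_oe_comparators(n):
--     # network generator, unchanged from the original module (auxiliary to the task)
--     comparators = []
--     p = 1
--     while p < n:
--         k = p
--         while k >= 1:
--             j_start = k % p
--             j_end = n - 1 - k
--             step_j = 2 * k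
--             j = j_start
--             while j <= j_end:
--                 i_max = min(k - 1, n - j - k - 1)
--                 for i in range(i_max + 1):
--                     left = (i + j) // (2 * p)
--                     right = (i + j + k) // (2 * p)
--                     if left == right:
--                         comparators.append((i + j, i + j + k))
--                 j += step_j
--             k //= 2
--         p *= 2
--     return comparators
--
-- def _bisect_left(a, x):
--     lo, hi = 0, len(a)
--     while lo < hi:
--         mid = (lo + hi) // 2
--         if a[mid] < x:
--             lo = mid + 1
--         else:
--             hi = mid
--     return lo
--
-- def _lis_patience(nums):
--     tails = []  # tails[k] = smallest tail of a strictly increasing subsequence of length k+1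
--     for x in nums:
--         pos = _bisect_left(tails, x)
--         if pos == len(tails):
--             tails.append(x)
--         else:
--             tails[pos] = x
--     return len(tails)
--
-- def find_max_lis_during_sorting(n):
--     arr = list(range(n, 0, -1))
--     best = _lis_patience(arr)
--     for i, j in get_batcher_oe_comparators(n):
--         if i < len(arr) and j < len(arr) and arr[i] > arr[j]:
--             arr[i], arr[j] = arr[j], arr[i]
--             best = max(best, _lis_patience(arr))
--     return best
-- ===== Notes on version B (the rewrite author's own statement) =====
-- stated objective: faster
-- what changed: each LIS length is recomputed by patience sorting (tails array + binary search) instead of the O(L^2) dynamic-programming table; the comparator network and the compare-swap sweep are unchanged.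
import Mathlib
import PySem

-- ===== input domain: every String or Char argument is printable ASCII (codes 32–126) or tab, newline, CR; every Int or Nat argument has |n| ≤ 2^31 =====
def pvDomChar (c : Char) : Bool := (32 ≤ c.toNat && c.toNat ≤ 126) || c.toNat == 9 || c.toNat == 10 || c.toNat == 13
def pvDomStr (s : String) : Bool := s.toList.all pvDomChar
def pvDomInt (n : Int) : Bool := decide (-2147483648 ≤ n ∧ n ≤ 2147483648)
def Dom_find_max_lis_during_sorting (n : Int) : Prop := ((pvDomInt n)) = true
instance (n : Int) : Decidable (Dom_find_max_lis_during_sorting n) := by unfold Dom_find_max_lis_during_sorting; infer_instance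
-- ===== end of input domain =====

-- B replaces each quadratic-DP LIS recomputation by patience sorting with binary search
-- (objective: faster); the comparator-network generator is the same helper in both sources,
-- so it is defined once here and used by both ports.

-- ===== SHARED HELPER (identical in Source A and Source B): get_batcher_oe_comparators =====
-- innermost `for i in range(i_max + 1)` with the floordiv test and the appends
def batcherRow (p k n j : Int) (acc : List (Int × Int)) : List (Int × Int) :=
  (PySem.List.pyRange 0 (min (k - 1) (n - j - k - 1) + 1) 1).foldl
    (fun a i =>
      if PySem.Int.floordiv (i + j) (2 * p) = PySem.Int.floordiv (i + j + k) (2 * p)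
      then a ++ [(i + j, i + j + k)] else a) acc

-- `while j <= j_end: … ; j += 2*k` — structural recursion on a fuel count that is
-- sufficient for the loop (j advances by 2*k ≥ 2 per iteration at every call site);
-- the loop body and exit test are the Python's
def batcherJ (p k n j_end : Int) : Nat → Int → List (Int × Int) → List (Int × Int)
  | 0, _, acc => acc
  | fuel + 1, j, acc =>
    if j ≤ j_end then batcherJ p k n j_end fuel (j + 2 * k) (batcherRow p k n j acc)
    else acc

-- `while k >= 1: … ; k //= 2` — fuel k.toNat is sufficient (k at least halves each time)
def batcherK (p n : Int) : Nat → Int → List (Int × Int) → List (Int × Int)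
  | 0, _, acc => acc
  | fuel + 1, k, acc =>
    if 1 ≤ k then
      batcherK p n fuel (PySem.Int.floordiv k 2)
        (batcherJ p k n (n - 1 - k) (n - 1 - k + 1 - PySem.Int.mod k p).toNat
          (PySem.Int.mod k p) acc)
    else acc

-- `while p < n: … ; p *= 2` — fuel n.toNat is sufficient (p doubles from 1)
def batcherP (n : Int) : Nat → Int → List (Int × Int) → List (Int × Int)
  | 0, _, acc => acc
  | fuel + 1, p, acc =>
    if p < n then batcherP n fuel (2 * p) (batcherK p n p.toNat p acc) else acc

def get_batcher_oe_comparators (n : Int) : List (Int × Int) := batcherP n n.toNat 1 []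

-- ===== PORT A =====
-- lengthOfLIS: quadratic DP.  Indices come from range(len(nums))/range(i), hence are in
-- range, so List.getD/List.set are exact here; max(dp) is PySem.List.max? (dp is nonempty).
def lengthOfLIS (nums : List Int) : Int :=
  if nums = [] then 0
  else
    let n := nums.length
    let dp := (List.range n).foldl
      (fun dp i =>
        (List.range i).foldl
          (fun dp j =>
            if nums.getD i 0 > nums.getD j 0 ∧ dp.getD i 0 < dp.getD j 0 + 1 then
              dp.set i (dp.getD j 0 + 1)
            else dp) dp)
      (List.replicate n 1)
    match PySem.List.max? dp (fun x => x) with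
    | some m => m
    | none => 0  -- unreachable: dp is nonempty

def find_max_lis_during_sorting (n : Int) : Int :=
  let comparators := get_batcher_oe_comparators n
  let arr0 := PySem.List.pyRange n 0 (-1)
  let max0 := lengthOfLIS arr0
  -- comparator indices are ≥ 0 by construction, so pyGetD/pySetD are exact under the
  -- `i < len(arr) and j < len(arr)` guard taken from the Python
  (comparators.foldl
    (fun (st : List Int × Int) pair =>
      let arr := st.1
      if pair.1 < PySem.List.len arr ∧ pair.2 < PySem.List.len arr then
        let ai := PySem.List.pyGetD arr pair.1 0
        let aj := PySem.List.pyGetD arr pair.2 0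
        if ai > aj then
          let arr' := PySem.List.pySetD (PySem.List.pySetD arr pair.1 aj) pair.2 ai
          let cur := lengthOfLIS arr'
          (arr', if cur > st.2 then cur else st.2)
        else (arr, st.2)
      else (arr, st.2))
    (arr0, max0)).2

-- ===== PORT B =====
-- patience step: Source B's hand-written _bisect_left is exactly the lo/hi binary-search loop
-- of PySem.List.bisectLeft, cited here instead of re-rolling it
def patStep (tails : List Int) (x : Int) : List Int :=
  let pos := PySem.List.bisectLeft tails x
  if pos = tails.length then tails ++ [x] else tails.set pos x

def lisPatience (nums : List Int) : Int :=
  PySem.List.len (nums.foldl patStep ([] : List Int))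

def goAlt (arr : List Int) (best : Int) : List (Int × Int) → Int
  | [] => best
  | (i, j) :: rest =>
    if i < PySem.List.len arr ∧ j < PySem.List.len arr ∧
        PySem.List.pyGetD arr i 0 > PySem.List.pyGetD arr j 0 then
      let ai := PySem.List.pyGetD arr i 0
      let aj := PySem.List.pyGetD arr j 0
      let arr' := PySem.List.pySetD (PySem.List.pySetD arr i aj) j ai
      goAlt arr' (max best (lisPatience arr')) rest
    else goAlt arr best rest

def find_max_lis_during_sorting_alt (n : Int) : Int :=
  let arr := PySem.List.pyRange n 0 (-1)
  goAlt arr (lisPatience arr) (get_batcher_oe_comparators n)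

-- ===== PRECONDITION & SPEC =====
def Spec_find_max_lis_during_sorting (n : Int) (out : Int) : Prop := out = find_max_lis_during_sorting_alt n
instance (n : Int) (out : Int) : Decidable (Spec_find_max_lis_during_sorting n out) := by unfold Spec_find_max_lis_during_sorting; infer_instance

-- ===== CLAIM (what is proved, stated in full; the proofs are below) =====
def Claim_equal_find_max_lis_during_sorting : Prop := ∀ (n : Int), Dom_find_max_lis_during_sorting n → Spec_find_max_lis_during_sorting n (find_max_lis_during_sorting n)

-- ===== LEMMAS AND PROOFS =====

-- functional characterisation of A's DP: value of a new element x after processed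
-- pairs zs (pair = (element, its dp value))
def newVal (zs : List (Int × Int)) (x : Int) : Int :=
  zs.foldl (fun c p => if p.1 < x then max c (p.2 + 1) else c) 1

def dpPairs (xs : List Int) : List (Int × Int) :=
  xs.foldl (fun zs x => zs ++ [(x, newVal zs x)]) []

-- conditional-max fold: bounds and shape
theorem foldl_cond_max (x : Int) :
    ∀ (zs : List (Int × Int)) (c : Int),
      c ≤ zs.foldl (fun c p => if p.1 < x then max c (p.2 + 1) else c) c ∧
      (∀ p ∈ zs, p.1 < x → p.2 + 1 ≤ zs.foldl (fun c p => if p.1 < x then max c (p.2 + 1) else c) c) ∧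
      (zs.foldl (fun c p => if p.1 < x then max c (p.2 + 1) else c) c = c ∨
        ∃ p ∈ zs, p.1 < x ∧ zs.foldl (fun c p => if p.1 < x then max c (p.2 + 1) else c) c = p.2 + 1) := by
  intro zs
  induction zs with
  | nil => intro c; exact ⟨le_refl _, by simp, Or.inl rfl⟩
  | cons p zs ih =>
    intro c
    simp only [List.foldl_cons]
    obtain ⟨h1, h2, h3⟩ := ih (if p.1 < x then max c (p.2 + 1) else c)
    refine ⟨?_, ?_, ?_⟩
    · refine le_trans ?_ h1
      split
      · exact le_max_left _ _
      · exact le_refl _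
    · intro q hq hql
      rcases List.mem_cons.mp hq with rfl | hmem
      · refine le_trans ?_ h1
        rw [if_pos hql]
        exact le_max_right _ _
      · exact h2 q hmem hql
    · rcases h3 with h3 | ⟨q, hq, hql, hqe⟩
      · by_cases hp : p.1 < x
        · rcases le_or_gt (p.2 + 1) c with hc | hc
          · left
            rw [h3, if_pos hp]
            exact max_eq_left hc
          · right
            refine ⟨p, List.mem_cons_self, hp, ?_⟩
            rw [h3, if_pos hp]
            exact max_eq_right (by omega)
        · left
          rw [h3, if_neg hp]
      · exact Or.inr ⟨q, List.mem_cons_of_mem _ hq, hql, hqe⟩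

theorem dpPairs_concat (l : List Int) (x : Int) :
    dpPairs (l ++ [x]) = dpPairs l ++ [(x, newVal (dpPairs l) x)] := by
  simp [dpPairs, List.foldl_append]

theorem dpPairs_fst (xs : List Int) : (dpPairs xs).map Prod.fst = xs := by
  induction xs using List.reverseRecOn with
  | nil => simp [dpPairs]
  | append_singleton l x ih => rw [dpPairs_concat]; simp [ih]

theorem dpPairs_length (xs : List Int) : (dpPairs xs).length = xs.length := by
  have h := congrArg List.length (dpPairs_fst xs)
  simpa using h

-- small list facts used to push the inner loop through `pref ++ c :: rest`
theorem getD_mid {α : Type} (l r : List α) (a d : α) : (l ++ a :: r).getD l.length d = a := by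
  rw [List.getD_eq_getElem _ _ (by simp)]
  rw [List.getElem_append_right (le_refl _)]
  simp
theorem getD_left {α : Type} (l r : List α) (j : Nat) (d : α) (h : j < l.length) :
    (l ++ r).getD j d = l.getD j d := by
  rw [List.getD_eq_getElem _ _ (by simp; omega), List.getD_eq_getElem _ _ h]
  exact List.getElem_append_left h
theorem set_mid {α : Type} (l r : List α) (a v : α) : (l ++ a :: r).set l.length v = l ++ v :: r := by
  rw [List.set_append]
  simp

-- A's inner loop over j keeps the prefix and the tail fixed and only folds the cell at
-- index pref.length
theorem innerA (x : Int) (nums : List Int) :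
    ∀ (L : List Nat) (pref : List Int) (c : Int) (rest : List Int),
      (∀ j ∈ L, j < pref.length) →
      L.foldl
        (fun dp j =>
          if x > nums.getD j 0 ∧ dp.getD pref.length 0 < dp.getD j 0 + 1 then
            dp.set pref.length (dp.getD j 0 + 1)
          else dp) (pref ++ c :: rest)
      = pref ++ (L.foldl (fun c j => if nums.getD j 0 < x then max c (pref.getD j 0 + 1) else c) c) :: rest := by
  intro L
  induction L with
  | nil => intro pref c rest _; simp
  | cons j L ih =>
    intro pref c rest hL
    have hj : j < pref.length := hL j (by simp)
    simp only [List.foldl_cons]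
    rw [getD_mid, getD_left _ _ _ _ hj, set_mid]
    by_cases h1 : nums.getD j 0 < x
    · by_cases h2 : c < pref.getD j 0 + 1
      · rw [if_pos ⟨h1, h2⟩, if_pos h1, max_eq_right (by omega)]
        exact ih pref _ rest (fun a ha => hL a (List.mem_cons_of_mem _ ha))
      · rw [if_neg (by tauto), if_pos h1, max_eq_left (by omega)]
        exact ih pref _ rest (fun a ha => hL a (List.mem_cons_of_mem _ ha))
    · rw [if_neg (by tauto), if_neg h1]
      exact ih pref _ rest (fun a ha => hL a (List.mem_cons_of_mem _ ha))

-- folding the range of indices equals folding the pair list itself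
theorem rangeFold (x : Int) (nums : List Int) :
    ∀ (zs : List (Int × Int)) (c : Int),
      (∀ j : Nat, j < zs.length → nums.getD j 0 = (zs.getD j (0, 0)).1) →
      (List.range zs.length).foldl
        (fun c j => if nums.getD j 0 < x then max c ((zs.map Prod.snd).getD j 0 + 1) else c) c
      = zs.foldl (fun c p => if p.1 < x then max c (p.2 + 1) else c) c := by
  intro zs
  induction zs using List.reverseRecOn with
  | nil => intro c _; simp
  | append_singleton zs p ih =>
    intro c hfst
    have hlen : (zs ++ [p]).length = zs.length + 1 := by simp
    rw [hlen, List.range_succ, List.foldl_append, List.foldl_append]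
    have hcongr :
        (List.range zs.length).foldl
          (fun c j => if nums.getD j 0 < x then max c (((zs ++ [p]).map Prod.snd).getD j 0 + 1) else c) c
        = (List.range zs.length).foldl
          (fun c j => if nums.getD j 0 < x then max c ((zs.map Prod.snd).getD j 0 + 1) else c) c := by
      refine PySem.List.foldl_congr_mem _ _ _ _ ?_
      intro acc j hjmem
      have hj : j < zs.length := List.mem_range.mp hjmem
      rw [List.map_append, getD_left _ _ _ _ (by simpa using hj)]
    rw [hcongr]
    rw [ih c (fun j hj => by
      rw [hfst j (by omega), getD_left _ _ _ _ hj])]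
    have hn : nums.getD zs.length 0 = p.1 := by
      rw [hfst zs.length (by omega)]
      have : ((zs ++ [p]).getD zs.length ((0 : Int), (0 : Int))) = p := getD_mid zs [] p (0, 0)
      rw [this]
    have hs : ((zs ++ [p]).map Prod.snd).getD zs.length 0 = p.2 := by
      rw [List.map_append]
      have hml : zs.length = (zs.map Prod.snd).length := by simp
      rw [hml]
      exact getD_mid (zs.map Prod.snd) ([] : List Int) p.2 0
    simp only [List.foldl_cons, List.foldl_nil]
    rw [hn, hs]

-- the outer loop invariant: after i outer iterations dp is the functional DP of the
-- first i elements followed by untouched 1s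
theorem dpLoop (nums : List Int) :
    ∀ i, i ≤ nums.length →
      (List.range i).foldl
        (fun dp i =>
          (List.range i).foldl
            (fun dp j =>
              if nums.getD i 0 > nums.getD j 0 ∧ dp.getD i 0 < dp.getD j 0 + 1 then
                dp.set i (dp.getD j 0 + 1)
              else dp) dp)
        (List.replicate nums.length 1)
      = (dpPairs (nums.take i)).map Prod.snd ++ List.replicate (nums.length - i) 1 := by
  intro i
  induction i with
  | zero => intro _; simp [dpPairs]
  | succ i ih =>
    intro hi
    have hil : i < nums.length := by omega
    rw [List.range_succ, List.foldl_append, ih (by omega)]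
    simp only [List.foldl_cons, List.foldl_nil]
    have hpl : ((dpPairs (nums.take i)).map Prod.snd).length = i := by
      simp [dpPairs_length]; omega
    have hrep : List.replicate (nums.length - i) (1 : Int)
        = 1 :: List.replicate (nums.length - (i + 1)) 1 := by
      rw [show nums.length - i = (nums.length - (i + 1)) + 1 by omega]
      simp [List.replicate_succ]
    rw [hrep]
    have hA := innerA (nums.getD i 0) nums (List.range i) ((dpPairs (nums.take i)).map Prod.snd)
      1 (List.replicate (nums.length - (i + 1)) 1)
      (by intro j hj; rw [hpl]; exact List.mem_range.mp hj)
    rw [hpl] at hA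
    rw [hA]
    have hfst : ∀ j : Nat, j < (dpPairs (nums.take i)).length →
        nums.getD j 0 = ((dpPairs (nums.take i)).getD j (0, 0)).1 := by
      intro j hj
      have hj' : j < i := by rwa [dpPairs_length, List.length_take, min_eq_left (by omega)] at hj
      have hmapfst := dpPairs_fst (nums.take i)
      have h1 : ((dpPairs (nums.take i)).getD j (0, 0)).1
          = ((dpPairs (nums.take i)).map Prod.fst).getD j 0 := by
        rw [List.getD_eq_getElem _ _ hj, List.getD_eq_getElem _ _ (by simpa using hj)]
        simp
      rw [h1, hmapfst, List.getD_eq_getElem _ _ (show j < (nums.take i).length by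
        rw [List.length_take]; omega), List.getD_eq_getElem _ _ (show j < nums.length by omega)]
      simp [List.getElem_take]
    have hR := rangeFold (nums.getD i 0) nums (dpPairs (nums.take i)) 1 hfst
    have hzl : (dpPairs (nums.take i)).length = i := by
      rw [dpPairs_length, List.length_take]; omega
    rw [hzl] at hR
    rw [hR]
    have ht : nums.take (i + 1) = nums.take i ++ [nums.getD i 0] := by
      rw [List.take_add_one]
      rw [List.getElem?_eq_getElem hil, List.getD_eq_getElem _ _ hil]
      simp
    rw [ht, dpPairs_concat]
    simp [newVal]

-- patience invariant: tails is strictly increasing, every dp value is in [1, |tails|],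
-- and tails[k] is the smallest element whose dp value is ≥ k+1 (with a witness at k+1)
def PatInv (zs : List (Int × Int)) (t : List Int) : Prop :=
  t.Pairwise (· < ·) ∧
  (∀ p ∈ zs, 1 ≤ p.2 ∧ p.2 ≤ (t.length : Int)) ∧
  (∀ k : Nat, ∀ _hk : k < t.length,
    (∃ p ∈ zs, p.2 = (k : Int) + 1 ∧ p.1 = t[k]) ∧
    (∀ p ∈ zs, (k : Int) + 1 ≤ p.2 → t[k] ≤ p.1))

theorem inv_step (zs : List (Int × Int)) (t : List Int) (x : Int) (h : PatInv zs t) :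
    PatInv (zs ++ [(x, newVal zs x)]) (patStep t x) := by
  obtain ⟨hpw, hbnd, hmin⟩ := h
  have hle : t.Pairwise (· ≤ ·) := hpw.imp (fun hab => le_of_lt hab)
  obtain ⟨hp1, hp2, hp3⟩ := PySem.List.bisectLeft_spec t x hle
  set pos := PySem.List.bisectLeft t x with hposdef
  have hpg := List.pairwise_iff_getElem.mp hpw
  have hnv : newVal zs x = (pos : Int) + 1 := by
    obtain ⟨g1, g2, g3⟩ := foldl_cond_max x zs 1
    have hub : ∀ p ∈ zs, p.1 < x → p.2 ≤ (pos : Int) := by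
      intro p hp hpx
      by_contra hgt
      rcases lt_or_ge pos t.length with hpos | hpos
      · have hm := (hmin pos hpos).2 p hp (by omega)
        have hxle := hp3 pos hpos (le_refl _)
        omega
      · have hb2 := (hbnd p hp).2
        have heq : pos = t.length := le_antisymm hp1 hpos
        omega
    show zs.foldl (fun c p => if p.1 < x then max c (p.2 + 1) else c) 1 = (pos : Int) + 1
    rcases Nat.eq_zero_or_pos pos with h0 | h0
    · rcases g3 with g3 | ⟨p, hp, hpx, hpe⟩
      · rw [g3, h0]; simp
      · have hu := hub p hp hpx
        have hb1 := (hbnd p hp).1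
        omega
    · have hklt : pos - 1 < t.length := by omega
      obtain ⟨q, hq, hqv, hqt⟩ := (hmin (pos - 1) hklt).1
      have hqtx : q.1 < x := by rw [hqt]; exact hp2 (pos - 1) hklt (by omega)
      have h2 := g2 q hq hqtx
      rcases g3 with g3 | ⟨p, hp, hpx, hpe⟩
      · omega
      · have h1 := hub p hp hpx
        omega
  have hps : patStep t x = if pos = t.length then t ++ [x] else t.set pos x := rfl
  rw [hps]
  by_cases hcase : pos = t.length
  · rw [if_pos hcase]
    refine ⟨?_, ?_, ?_⟩
    · rw [List.pairwise_append]
      refine ⟨hpw, List.pairwise_singleton _ _, ?_⟩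
      intro a ha b hb
      simp only [List.mem_singleton] at hb
      subst hb
      obtain ⟨j, hj, rfl⟩ := List.getElem_of_mem ha
      exact hp2 j hj (by omega)
    · intro p hp
      rcases List.mem_append.mp hp with hp | hp
      · have hb := hbnd p hp
        refine ⟨hb.1, ?_⟩
        simp only [List.length_append, List.length_singleton]
        push_cast
        omega
      · simp only [List.mem_singleton] at hp
        subst hp
        have h2 : ((x, newVal zs x)).2 = (pos : Int) + 1 := hnv
        refine ⟨?_, ?_⟩
        · rw [h2]; omega
        · rw [h2]
          simp only [List.length_append, List.length_singleton, hcase]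
          push_cast
          omega
    · intro k hk
      have hk' : k < t.length + 1 := by simpa using hk
      by_cases hkl : k < t.length
      · have hgetk : (t ++ [x])[k]'hk = t[k] := List.getElem_append_left hkl
        constructor
        · obtain ⟨p, hp, hv, ht'⟩ := (hmin k hkl).1
          exact ⟨p, List.mem_append_left _ hp, hv, by rw [ht', hgetk]⟩
        · intro p hp hkv
          rcases List.mem_append.mp hp with hp | hp
          · rw [hgetk]; exact (hmin k hkl).2 p hp hkv
          · simp only [List.mem_singleton] at hp; subst hp
            rw [hgetk]
            exact le_of_lt (hp2 k hkl (by omega))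
      · have hk2 : k = t.length := by omega
        subst hk2
        have hgetk : (t ++ [x])[t.length]'hk = x := by
          rw [List.getElem_append_right (le_refl _)]; simp
        constructor
        · refine ⟨(x, newVal zs x), List.mem_append_right _ (by simp), ?_, by rw [hgetk]⟩
          show newVal zs x = (t.length : Int) + 1
          rw [hnv, hcase]
        · intro p hp hkv
          rcases List.mem_append.mp hp with hp | hp
          · have hb := (hbnd p hp).2
            have hkv' : ((t.length : Nat) : Int) + 1 ≤ p.2 := hkv
            omega
          · simp only [List.mem_singleton] at hp; subst hp
            rw [hgetk]
  · rw [if_neg hcase]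
    have hposlt : pos < t.length := lt_of_le_of_ne hp1 hcase
    have hxle : x ≤ t[pos] := hp3 pos hposlt (le_refl _)
    refine ⟨?_, ?_, ?_⟩
    · rw [List.pairwise_iff_getElem]
      intro a b ha hb hab
      rw [List.length_set] at ha hb
      rw [List.getElem_set, List.getElem_set]
      by_cases hap : pos = a
      · rw [if_pos hap, if_neg (by omega)]
        have hlt := hpg pos b hposlt hb (by omega)
        omega
      · rw [if_neg hap]
        by_cases hbp : pos = b
        · rw [if_pos hbp]
          exact hp2 a ha (by omega)
        · rw [if_neg hbp]
          exact hpg a b ha hb hab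
    · intro p hp
      rcases List.mem_append.mp hp with hp | hp
      · have hb := hbnd p hp
        rw [List.length_set]
        exact hb
      · simp only [List.mem_singleton] at hp; subst hp
        rw [List.length_set]
        have h2 : ((x, newVal zs x)).2 = (pos : Int) + 1 := hnv
        refine ⟨by rw [h2]; omega, by rw [h2]; omega⟩
    · intro k hk
      rw [List.length_set] at hk
      by_cases hkp : k = pos
      · subst hkp
        have hset : (t.set pos x)[pos]'(by rw [List.length_set]; omega) = x := by
          rw [List.getElem_set, if_pos rfl]
        constructor
        · exact ⟨(x, newVal zs x), List.mem_append_right _ (by simp), hnv, by rw [hset]⟩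
        · intro p hp hkv
          rcases List.mem_append.mp hp with hp | hp
          · have hold := (hmin pos hposlt).2 p hp hkv
            rw [hset]
            omega
          · simp only [List.mem_singleton] at hp; subst hp
            rw [hset]
      · have hset : (t.set pos x)[k]'(by rw [List.length_set]; omega) = t[k] := by
          rw [List.getElem_set, if_neg (by omega)]
        constructor
        · obtain ⟨p, hp, hv, ht'⟩ := (hmin k (by omega)).1
          exact ⟨p, List.mem_append_left _ hp, hv, by rw [ht', hset]⟩
        · intro p hp hkv
          rcases List.mem_append.mp hp with hp | hp
          · rw [hset]; exact (hmin k (by omega)).2 p hp hkv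
          · simp only [List.mem_singleton] at hp; subst hp
            have hkv' : (k : Int) + 1 ≤ newVal zs x := hkv
            rw [hnv] at hkv'
            have hklt : k < pos := by omega
            rw [hset]
            exact le_of_lt (hp2 k (by omega) hklt)

theorem inv_all (xs : List Int) : PatInv (dpPairs xs) (xs.foldl patStep []) := by
  induction xs using List.reverseRecOn with
  | nil =>
    exact ⟨List.Pairwise.nil, by simp [dpPairs], fun k hk => absurd hk (by simp)⟩
  | append_singleton l x ih =>
    rw [dpPairs_concat, List.foldl_append]
    simp only [List.foldl_cons, List.foldl_nil]
    exact inv_step _ _ _ ih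

theorem lis_eq (nums : List Int) : lengthOfLIS nums = lisPatience nums := by
  by_cases hnil : nums = []
  · subst hnil; rfl
  · unfold lengthOfLIS lisPatience
    rw [if_neg hnil]
    obtain ⟨hpw, hbnd, hmin⟩ := inv_all nums
    have hdp := dpLoop nums nums.length (le_refl _)
    rw [List.take_length] at hdp
    simp only [Nat.sub_self, List.replicate_zero, List.append_nil] at hdp
    simp only [hdp]
    have hzl : (dpPairs nums).length = nums.length := dpPairs_length nums
    have hzne : dpPairs nums ≠ [] := by
      intro h0
      apply hnil
      have hc := congrArg List.length h0
      rw [hzl] at hc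
      simpa using hc
    have hvne : (dpPairs nums).map Prod.snd ≠ [] := by
      simpa using hzne
    obtain ⟨p0, hp0⟩ : ∃ p, p ∈ dpPairs nums := List.exists_mem_of_ne_nil _ hzne
    have htl1 : 1 ≤ (nums.foldl patStep []).length := by
      have h1 := (hbnd p0 hp0).1
      have h2 := (hbnd p0 hp0).2
      omega
    obtain ⟨q, hq, hqv, hqt⟩ := (hmin ((nums.foldl patStep []).length - 1) (by omega)).1
    have hqval : q.2 = ((nums.foldl patStep []).length : Int) := by rw [hqv]; push_cast [htl1]; omega
    cases hm : PySem.List.max? ((dpPairs nums).map Prod.snd) (fun x => x) with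
    | none => exact absurd ((PySem.List.max?_eq_none_iff _ _).mp hm) hvne
    | some m =>
      have hmem := PySem.List.max?_mem hm
      have hmax := PySem.List.max?_isMax hm
      obtain ⟨pm, hpm, hpm2⟩ := List.mem_map.mp hmem
      have hub : m ≤ ((nums.foldl patStep []).length : Int) := by
        rw [← hpm2]; exact (hbnd pm hpm).2
      have hlb : ((nums.foldl patStep []).length : Int) ≤ m := by
        have hqin : q.2 ∈ (dpPairs nums).map Prod.snd := List.mem_map.mpr ⟨q, hq, rfl⟩
        have hqm := hmax _ hqin
        omega
      have hme : m = ((nums.foldl patStep []).length : Int) := le_antisymm hub hlb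
      simp [PySem.List.len_eq, hme]

theorem go_eq :
    ∀ (comps : List (Int × Int)) (arr : List Int) (best : Int),
      (comps.foldl
        (fun (st : List Int × Int) pair =>
          let arr := st.1
          if pair.1 < PySem.List.len arr ∧ pair.2 < PySem.List.len arr then
            let ai := PySem.List.pyGetD arr pair.1 0
            let aj := PySem.List.pyGetD arr pair.2 0
            if ai > aj then
              let arr' := PySem.List.pySetD (PySem.List.pySetD arr pair.1 aj) pair.2 ai
              let cur := lengthOfLIS arr'
              (arr', if cur > st.2 then cur else st.2)
            else (arr, st.2)
          else (arr, st.2)) (arr, best)).2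
      = goAlt arr best comps := by
  intro comps
  induction comps with
  | nil => intro arr best; simp [goAlt]
  | cons pr rest ih =>
    intro arr best
    obtain ⟨i, j⟩ := pr
    rw [List.foldl_cons]
    simp only [goAlt]
    by_cases h1 : i < PySem.List.len arr ∧ j < PySem.List.len arr
    · by_cases h2 : PySem.List.pyGetD arr i 0 > PySem.List.pyGetD arr j 0
      · have h3 : i < PySem.List.len arr ∧ j < PySem.List.len arr ∧
            PySem.List.pyGetD arr i 0 > PySem.List.pyGetD arr j 0 := ⟨h1.1, h1.2, h2⟩
        rw [if_pos h1, if_pos h2, if_pos h3]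
        have hbest : (if lengthOfLIS (PySem.List.pySetD (PySem.List.pySetD arr i (PySem.List.pyGetD arr j 0)) j (PySem.List.pyGetD arr i 0)) > best
              then lengthOfLIS (PySem.List.pySetD (PySem.List.pySetD arr i (PySem.List.pyGetD arr j 0)) j (PySem.List.pyGetD arr i 0)) else best)
            = max best (lisPatience (PySem.List.pySetD (PySem.List.pySetD arr i (PySem.List.pyGetD arr j 0)) j (PySem.List.pyGetD arr i 0))) := by
          rw [lis_eq]
          split
          · omega
          · omega
        rw [hbest]
        exact ih _ _
      · rw [if_pos h1, if_neg h2, if_neg (by tauto)]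
        exact ih _ _
    · rw [if_neg h1, if_neg (by tauto)]
      exact ih _ _

-- ===== VERDICT (by name: the statement is the Claim_ definition above) =====
theorem find_max_lis_during_sorting_spec : Claim_equal_find_max_lis_during_sorting := by
  intro n _
  unfold Spec_find_max_lis_during_sorting find_max_lis_during_sorting find_max_lis_during_sorting_alt
  exact (go_eq (get_batcher_oe_comparators n) (PySem.List.pyRange n 0 (-1))
    (lengthOfLIS (PySem.List.pyRange n 0 (-1)))).trans (by rw [lis_eq])
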